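-- pv_equiv track=rewrite | github.com/matharrismma/Lighthouse | eval/benchmark/adapter_anthropic.py | _to_anthropic_messages
-- ===== SOURCE A (Python) =====
-- from typing import Any, Callable, Dict, List
--
-- def _to_anthropic_messages(messages: List[Dict[str, str]]):
--     """Split chat-completions style messages into (system, anthropic_messages)."""
--     system = ""
--     out = []
--     for m in messages:
--         if m["role"] == "system":
--             system = m["content"]
--         else:
--             out.append({"role": m["role"], "content": m["content"]})
--     return system, out
-- ===== SOURCE B (Python) =====
-- def _to_anthropic_messages(messages):
--     """Split chat-completions style messages into (system, anthropic_messages)."""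
--     out = [{"role": m["role"], "content": m["content"]}
--            for m in messages if m["role"] != "system"]
--     system = next((m["content"] for m in reversed(messages)
--                    if m["role"] == "system"), "")
--     return system, out
-- ===== Notes on version B (the rewrite author's own statement) =====
-- stated objective: alternative
-- what changed: Replaces the single forward loop with overwriting accumulator by two independent passes: a filter/map comprehension builds the non-system output, and a short-circuiting reverse scan recovers the last system message's content.
import Mathlib
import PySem

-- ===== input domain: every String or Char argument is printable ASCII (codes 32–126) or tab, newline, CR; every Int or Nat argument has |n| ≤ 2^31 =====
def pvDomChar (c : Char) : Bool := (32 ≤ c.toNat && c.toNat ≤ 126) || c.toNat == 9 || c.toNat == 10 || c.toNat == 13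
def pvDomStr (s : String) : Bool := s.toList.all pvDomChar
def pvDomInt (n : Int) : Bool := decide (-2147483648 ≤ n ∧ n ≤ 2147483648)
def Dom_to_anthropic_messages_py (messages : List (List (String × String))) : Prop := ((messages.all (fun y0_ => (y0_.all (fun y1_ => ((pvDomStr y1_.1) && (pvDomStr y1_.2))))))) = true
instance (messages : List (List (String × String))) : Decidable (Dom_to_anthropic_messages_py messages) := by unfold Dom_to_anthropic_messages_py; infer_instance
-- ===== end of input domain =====

-- ===== PORT A =====
-- Port of A: one forward pass; a "system" message overwrites the accumulated system string,
-- any other message is appended to the output list.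
-- dict lookup m[k] (first match in the association list; Pre_ guarantees the key is present)
def pvGetS (m : List (String × String)) (k : String) : String :=
  match m.find? (fun p => p.1 == k) with
  | some p => p.2
  | none => ""

def to_anthropic_messages_py (messages : List (List (String × String))) : String × (List (List (String × String))) :=
  messages.foldl
    (fun acc m =>
      if pvGetS m "role" == "system" then
        (pvGetS m "content", acc.2)
      else
        (acc.1, acc.2 ++ [[("role", pvGetS m "role"), ("content", pvGetS m "content")]]))
    ("", [])

-- ===== PORT B =====
-- system = next((m["content"] for m in reversed(messages) if m["role"] == "system"), "")
def pvAltSystem (messages : List (List (String × String))) : String :=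
  match messages.reverse.find? (fun m => pvGetS m "role" == "system") with
  | some m => pvGetS m "content"
  | none => ""

def to_anthropic_messages_py_alt (messages : List (List (String × String))) : String × (List (List (String × String))) :=
  (pvAltSystem messages,
   (messages.filter (fun m => !(pvGetS m "role" == "system"))).map
     (fun m => [("role", pvGetS m "role"), ("content", pvGetS m "content")]))

-- ===== PRECONDITION & SPEC =====
-- Pre_ excludes exactly the inputs where Python A raises KeyError: a message missing "role" or "content".
def Pre_to_anthropic_messages_py (messages : List (List (String × String))) : Prop :=
  ∀ m ∈ messages, (m.find? (fun p => p.1 == "role")).isSome ∧ (m.find? (fun p => p.1 == "content")).isSome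
instance (messages : List (List (String × String))) : Decidable (Pre_to_anthropic_messages_py messages) := by unfold Pre_to_anthropic_messages_py; infer_instance
def pvWitness_to_anthropic_messages_py : (List (List (String × String))) :=
  [[("role", "system"), ("content", "be nice")], [("role", "user"), ("content", "hi")]]

def Spec_to_anthropic_messages_py (messages : List (List (String × String))) (out : String × (List (List (String × String)))) : Prop := out = to_anthropic_messages_py_alt messages
instance (messages : List (List (String × String))) (out : String × (List (List (String × String)))) : Decidable (Spec_to_anthropic_messages_py messages out) := by unfold Spec_to_anthropic_messages_py; infer_instance

-- ===== CLAIM (what is proved, stated in full; the proofs are below) =====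
def Claim_equal_to_anthropic_messages_py : Prop := ∀ (messages : List (List (String × String))), Dom_to_anthropic_messages_py messages → Pre_to_anthropic_messages_py messages → Spec_to_anthropic_messages_py messages (to_anthropic_messages_py messages)

-- ===== LEMMAS AND PROOFS =====

-- Characterisation of A's foldl from an arbitrary accumulator.
theorem pv_foldl_char (messages : List (List (String × String))) (s : String) (out : List (List (String × String))) :
    messages.foldl
      (fun acc m =>
        if pvGetS m "role" == "system" then
          (pvGetS m "content", acc.2)
        else
          (acc.1, acc.2 ++ [[("role", pvGetS m "role"), ("content", pvGetS m "content")]]))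
      (s, out)
    = ((match messages.reverse.find? (fun m => pvGetS m "role" == "system") with
        | some m => pvGetS m "content"
        | none => s),
       out ++ (messages.filter (fun m => !(pvGetS m "role" == "system"))).map
         (fun m => [("role", pvGetS m "role"), ("content", pvGetS m "content")])) := by
  induction messages generalizing s out with
  | nil => simp
  | cons m ms ih =>
    simp only [List.foldl_cons, List.reverse_cons, List.find?_append, List.filter_cons]
    by_cases h : (pvGetS m "role" == "system") = true
    · rw [if_pos h]
      rw [ih]
      simp [h]
      cases ms.reverse.find? (fun m => pvGetS m "role" == "system") <;> simp
    · rw [if_neg h]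
      rw [ih]
      simp [h]

-- ===== VERDICT (by name: the statement is the Claim_ definition above) =====
theorem to_anthropic_messages_py_spec : Claim_equal_to_anthropic_messages_py := by
  intro messages _ _
  unfold Spec_to_anthropic_messages_py to_anthropic_messages_py to_anthropic_messages_py_alt pvAltSystem
  rw [pv_foldl_char]
  simp
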